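-- pv_equiv track=rewrite | github.com/4rek/advent-of-code | 2023/day2/solution.py | part1
-- ===== SOURCE A (Python) =====
-- from typing import List
--
-- def part1(lines: List[str]):
--     results = 0
--     for game, line in enumerate(lines):
--         max_colors = {
--             "red": 0,
--             "green": 0,
--             "blue": 0
--         }
--         row = line.split(' ')[2:][::-1]
--
--         for idx, item in enumerate(row):
--             i = item.strip().replace(',', '').replace(';', '')
--             if idx % 2 == 0:
--                 v = int(row[idx+1])
--                 max_colors[i] = v if max_colors[i] < v else max_colors[i];
--
--         if max_colors["red"] <= 12 and max_colors["green"] <= 13 and max_colors["blue"] <= 14: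
--             results = results + game + 1
--
--     return results
-- ===== SOURCE B (Python) =====
-- from typing import List
--
-- def part1(lines: List[str]):
--     # Forward pairwise scan with a validity flag instead of a reversed scan
--     # building a dict of per-color maxima.
--     limits = {"red": 12, "green": 13, "blue": 14}
--     total = 0
--     for i, line in enumerate(lines):
--         toks = line.split(' ')[2:]
--         valid = True
--         while len(toks) >= 2:
--             color = toks[1].strip().replace(',', '').replace(';', '')
--             if int(toks[0]) > limits[color]:
--                 valid = False
--             toks = toks[2:]
--         if valid:
--             total += i + 1
--     return total
-- ===== Notes on version B (the rewrite author's own statement) =====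
-- stated objective: simpler
-- what changed: A scans the reversed token list with enumerate, parity tests and lookups of the next token to build a dict of per-color maxima that it compares against the limits at the end; B consumes the tokens forward two at a time (value, color) and keeps a single boolean validity flag that is cleared as soon as a draw exceeds its color's limit, with no dict of maxima.
import Mathlib
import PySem

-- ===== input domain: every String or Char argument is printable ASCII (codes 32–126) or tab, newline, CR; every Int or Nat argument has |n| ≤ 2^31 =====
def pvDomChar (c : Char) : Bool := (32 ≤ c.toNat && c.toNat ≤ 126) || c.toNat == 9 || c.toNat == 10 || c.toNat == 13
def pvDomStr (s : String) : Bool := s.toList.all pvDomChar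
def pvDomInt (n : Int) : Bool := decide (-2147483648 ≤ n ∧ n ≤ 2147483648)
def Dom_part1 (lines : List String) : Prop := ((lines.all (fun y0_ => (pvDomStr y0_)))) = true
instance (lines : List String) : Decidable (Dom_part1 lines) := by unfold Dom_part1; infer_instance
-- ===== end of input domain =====

-- B replaces A's reversed token scan building a dict of per-color maxima by a forward
-- pairwise consumption of the tokens with a single boolean validity flag (objective: simpler).

-- shared helpers (both Pythons perform these identical steps)
def part1Clean (s : String) : String :=
  PySem.Str.replace (PySem.Str.replace (PySem.Str.strip s) "," "") ";" ""

def part1Toks (line : String) : List String :=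
  PySem.List.slice ((PySem.Str.split? line " ").getD []) (some 2) none

-- ===== PORT A =====
def part1 (lines : List String) : Int :=
  (PySem.List.enumerate lines 0).foldl (fun results gl =>
    let row := (PySem.List.slice? (part1Toks gl.2) none none (-1)).getD []
    let maxColors : PySem.Dict String Int :=
      (PySem.List.enumerate row 0).foldl (fun d p =>
        let i := part1Clean p.2
        if PySem.Int.mod p.1 2 == 0 then
          let v := (PySem.Int.ofStr? (PySem.List.pyGetD row (p.1 + 1) "")).getD 0
          d.insert i (if d.getD i 0 < v then v else d.getD i 0)
        else d)
        (PySem.Dict.ofList [("red", 0), ("green", 0), ("blue", 0)])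
    if maxColors.getD "red" 0 ≤ 12 ∧ maxColors.getD "green" 0 ≤ 13 ∧ maxColors.getD "blue" 0 ≤ 14 then
      results + gl.1 + 1
    else results) 0

-- ===== PORT B =====
def part1AltLimits : PySem.Dict String Int :=
  PySem.Dict.ofList [("red", 12), ("green", 13), ("blue", 14)]

-- the 'while len(toks) >= 2' loop of Source B, consuming two tokens per step
def part1AltValid : List String → Bool → Bool
  | v :: c :: rest, valid =>
      let color := part1Clean c
      let valid' := if (PySem.Int.ofStr? v).getD 0 > part1AltLimits.getD color 0 then false else valid
      part1AltValid rest valid'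
  | _, valid => valid

def part1_alt (lines : List String) : Int :=
  (PySem.List.enumerate lines 0).foldl (fun total il =>
    if part1AltValid (part1Toks il.2) true then total + il.1 + 1 else total) 0

-- ===== PRECONDITION & SPEC =====
-- Pre_ excludes exactly the inputs on which A raises: a line whose tokens after the first
-- two are not (int-parsable, red/green/blue) pairs gives IndexError/ValueError/KeyError in A.
def part1PairsOK : List String → Bool
  | [] => true
  | [_] => false
  | v :: c :: rest =>
      (PySem.Int.ofStr? v).isSome &&
      (part1Clean c == "red" || part1Clean c == "green" || part1Clean c == "blue") &&
      part1PairsOK rest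

def Pre_part1 (lines : List String) : Prop :=
  ∀ line ∈ lines, part1PairsOK (part1Toks line) = true
instance (lines : List String) : Decidable (Pre_part1 lines) := by unfold Pre_part1; infer_instance

def pvWitness_part1 : List String :=
  ["Game 1: 3 blue, 4 red; 1 red", "Game 2: 20 red", "Game 3:"]

def Spec_part1 (lines : List String) (out : Int) : Prop := out = part1_alt lines
instance (lines : List String) (out : Int) : Decidable (Spec_part1 lines out) := by unfold Spec_part1; infer_instance

-- ===== CLAIM (what is proved, stated in full; the proofs are below) =====
def Claim_equal_part1 : Prop := ∀ (lines : List String), Dom_part1 lines → Pre_part1 lines → Spec_part1 lines (part1 lines)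

-- ===== LEMMAS AND PROOFS =====

-- the (color, value) pairs of a forward token list [v0, c0, v1, c1, …]
def part1Pairs : List String → List (String × Int)
  | v :: c :: rest => (part1Clean c, (PySem.Int.ofStr? v).getD 0) :: part1Pairs rest
  | _ => []

-- the (color, value) pairs of a reversed row [c0, v0, c1, v1, …]
def part1RowPairs : List String → List (String × Int)
  | c :: v :: rest => (part1Clean c, (PySem.Int.ofStr? v).getD 0) :: part1RowPairs rest
  | _ => []

-- A's dict update, re-folded over an explicit pair list
def part1PairFold (d : PySem.Dict String Int) : List (String × Int) → PySem.Dict String Int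
  | [] => d
  | (c, v) :: ps => part1PairFold (d.insert c (if d.getD c 0 < v then v else d.getD c 0)) ps

def part1RGB (c : String) : Prop := c = "red" ∨ c = "green" ∨ c = "blue"

def part1Ok (p : String × Int) : Bool := !(p.2 > part1AltLimits.getD p.1 0)

-- B's loop is the all-check over the forward pairs
theorem part1AltValid_eq (toks : List String) (b : Bool) :
    part1AltValid toks b = (b && (part1Pairs toks).all part1Ok) := by
  induction toks using part1Pairs.induct generalizing b with
  | case1 v c rest ih =>
      simp only [part1AltValid, part1Pairs, List.all_cons, part1Ok, ih]
      split_ifs with h <;> simp [h]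
  | case2 t h1 =>
      cases t with
      | nil => simp [part1AltValid, part1Pairs]
      | cons x xs =>
          cases xs with
          | nil => simp [part1AltValid, part1Pairs]
          | cons y ys => exact absurd rfl (h1 x y ys)

theorem part1RowPairs_append (xs : List String) (c v : String) (h : xs.length % 2 = 0) :
    part1RowPairs (xs ++ [c, v]) = part1RowPairs xs ++ [(part1Clean c, (PySem.Int.ofStr? v).getD 0)] := by
  induction xs using part1RowPairs.induct with
  | case1 c' v' rest ih =>
      simp only [List.cons_append, part1RowPairs]
      rw [ih (by simp at h; omega)]
  | case2 t h1 =>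
      cases t with
      | nil => simp [part1RowPairs]
      | cons x xs =>
          cases xs with
          | nil => simp at h
          | cons y ys => exact absurd rfl (h1 x y ys)

theorem part1RowPairs_reverse (toks : List String) (h : toks.length % 2 = 0) :
    part1RowPairs toks.reverse = (part1Pairs toks).reverse := by
  induction toks using part1Pairs.induct with
  | case1 v c rest ih =>
      have hr : rest.length % 2 = 0 := by simp at h; omega
      have : (v :: c :: rest).reverse = rest.reverse ++ [c, v] := by simp
      rw [this, part1RowPairs_append _ _ _ (by simpa using hr), ih hr]
      simp [part1Pairs]
  | case2 t h1 =>
      cases t with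
      | nil => simp [part1RowPairs, part1Pairs]
      | cons x xs =>
          cases xs with
          | nil => simp at h
          | cons y ys => exact absurd rfl (h1 x y ys)

-- A's inner fold over the enumerated reversed row equals the pair fold over its pairs
theorem part1_inner_gen (rest pre : List String) (d : PySem.Dict String Int)
    (hpre : pre.length % 2 = 0) (hrest : rest.length % 2 = 0) :
    (PySem.List.enumerate rest (pre.length : Int)).foldl (fun d p =>
        let i := part1Clean p.2
        if PySem.Int.mod p.1 2 == 0 then
          let v := (PySem.Int.ofStr? (PySem.List.pyGetD (pre ++ rest) (p.1 + 1) "")).getD 0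
          d.insert i (if d.getD i 0 < v then v else d.getD i 0)
        else d) d
      = part1PairFold d (part1RowPairs rest) := by
  induction rest using part1RowPairs.induct generalizing pre d with
  | case1 c v t ih =>
      have h1 : (PySem.Int.mod (pre.length : Int) 2 == 0) = true := by
        simp; omega
      have h2 : (PySem.Int.mod ((pre.length : Int) + 1) 2 == 0) = false := by
        have : (pre.length : Int) + 1 = ((pre.length + 1 : Nat) : Int) := by norm_cast
        rw [this]
        simp
        omega
      have h3 : PySem.List.pyGetD (pre ++ c :: v :: t) ((pre.length : Int) + 1) "" = v := by
        have : (pre.length : Int) + 1 = ((pre.length + 1 : Nat) : Int) := by norm_cast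
        rw [this, PySem.List.pyGetD_natCast]
        simp [List.getD]
      rw [PySem.List.enumerate_cons, PySem.List.enumerate_cons, List.foldl_cons, List.foldl_cons]
      simp only [h1, h2, h3, if_true, if_false, Bool.false_eq_true]
      have hre : pre ++ c :: v :: t = (pre ++ [c, v]) ++ t := by simp
      have hlen : (pre.length : Int) + 1 + 1 = (((pre ++ [c, v]).length : Nat) : Int) := by
        simp; push_cast; ring
      rw [hre, hlen, ih (pre ++ [c, v]) _ (by simp; omega) (by simp at hrest; omega)]
      simp [part1RowPairs, part1PairFold]
  | case2 t h1 =>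
      cases t with
      | nil => simp [part1RowPairs, part1PairFold, PySem.List.enumerate_nil]
      | cons x xs =>
          cases xs with
          | nil => simp at hrest
          | cons y ys => exact absurd rfl (h1 x y ys)

-- the maxima condition after the pair fold is the all-check
theorem part1Cond_pairFold (ps : List (String × Int)) (d : PySem.Dict String Int)
    (h : ∀ p ∈ ps, part1RGB p.1) :
    (((part1PairFold d ps).getD "red" 0 ≤ 12) ∧ ((part1PairFold d ps).getD "green" 0 ≤ 13) ∧
      ((part1PairFold d ps).getD "blue" 0 ≤ 14)) ↔
    ((d.getD "red" 0 ≤ 12 ∧ d.getD "green" 0 ≤ 13 ∧ d.getD "blue" 0 ≤ 14) ∧ ps.all part1Ok = true) := by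
  induction ps generalizing d with
  | nil => simp [part1PairFold]
  | cons p ps ih =>
      obtain ⟨c, v⟩ := p
      have hc : part1RGB c := h (c, v) (by simp)
      have hrest : ∀ p ∈ ps, part1RGB p.1 := fun p hp => h p (by simp [hp])
      simp only [part1PairFold, List.all_cons, ih _ hrest]
      have hlr : part1AltLimits.getD "red" 0 = 12 := by decide
      have hlg : part1AltLimits.getD "green" 0 = 13 := by decide
      have hlb : part1AltLimits.getD "blue" 0 = 14 := by decide
      have hmax : ∀ (cur v L : Int), ((if cur < v then v else cur) ≤ L ↔ (cur ≤ L ∧ v ≤ L)) := by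
        intro cur v L; split_ifs <;> omega
      rcases hc with hc | hc | hc <;> subst hc <;>
        simp [PySem.Dict.getD_insert, part1Ok, hlr, hlg, hlb, hmax] <;> tauto

theorem part1PairsOK_length (toks : List String) (h : part1PairsOK toks = true) :
    toks.length % 2 = 0 := by
  induction toks using part1PairsOK.induct with
  | case1 => simp
  | case2 x => simp [part1PairsOK] at h
  | case3 v c rest ih =>
      simp only [part1PairsOK, Bool.and_eq_true] at h
      have := ih h.2
      simp
      omega

theorem part1PairsOK_rgb (toks : List String) (h : part1PairsOK toks = true) :
    ∀ p ∈ part1Pairs toks, part1RGB p.1 := by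
  induction toks using part1PairsOK.induct with
  | case1 => simp [part1Pairs]
  | case2 x => simp [part1PairsOK] at h
  | case3 v c rest ih =>
      simp only [part1PairsOK, Bool.and_eq_true, Bool.or_eq_true, beq_iff_eq] at h
      intro p hp
      simp only [part1Pairs, List.mem_cons] at hp
      rcases hp with hp | hp
      · subst hp
        show part1RGB (part1Clean c)
        unfold part1RGB
        rcases h.1.2 with (h' | h') | h'
        · exact Or.inl h'
        · exact Or.inr (Or.inl h')
        · exact Or.inr (Or.inr h')
      · exact ih h.2 p hp

-- per-line agreement: A's maxima condition on the reversed row iff B's validity flag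
theorem part1_line_eq (toks : List String) (h : part1PairsOK toks = true)
    (M : PySem.Dict String Int)
    (hM : M = (PySem.List.enumerate toks.reverse 0).foldl (fun d p =>
        let i := part1Clean p.2
        if PySem.Int.mod p.1 2 == 0 then
          let v := (PySem.Int.ofStr? (PySem.List.pyGetD toks.reverse (p.1 + 1) "")).getD 0
          d.insert i (if d.getD i 0 < v then v else d.getD i 0)
        else d)
        (PySem.Dict.ofList [("red", 0), ("green", 0), ("blue", 0)])) :
    (M.getD "red" 0 ≤ 12 ∧ M.getD "green" 0 ≤ 13 ∧ M.getD "blue" 0 ≤ 14) ↔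
    part1AltValid toks true = true := by
  have hlen : toks.length % 2 = 0 := part1PairsOK_length toks h
  have hrev : toks.reverse.length % 2 = 0 := by simpa using hlen
  have hinner := part1_inner_gen toks.reverse [] (PySem.Dict.ofList [("red", 0), ("green", 0), ("blue", 0)]) (by simp) hrev
  simp only [List.nil_append, List.length_nil, Nat.cast_zero] at hinner
  rw [hinner] at hM
  subst hM
  have hrgb : ∀ p ∈ part1RowPairs toks.reverse, part1RGB p.1 := by
    rw [part1RowPairs_reverse toks hlen]
    intro p hp
    exact part1PairsOK_rgb toks h p (List.mem_reverse.mp hp)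
  rw [part1Cond_pairFold _ _ hrgb, part1AltValid_eq]
  rw [part1RowPairs_reverse toks hlen]
  have hr : (PySem.Dict.ofList [("red", (0:Int)), ("green", 0), ("blue", 0)]).getD "red" 0 = 0 := by decide
  have hg : (PySem.Dict.ofList [("red", (0:Int)), ("green", 0), ("blue", 0)]).getD "green" 0 = 0 := by decide
  have hb : (PySem.Dict.ofList [("red", (0:Int)), ("green", 0), ("blue", 0)]).getD "blue" 0 = 0 := by decide
  simp [hr, hg, hb, List.all_reverse]

-- ===== VERDICT (by name: the statement is the Claim_ definition above) =====
theorem part1_spec : Claim_equal_part1 := by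
  intro lines _ hpre
  unfold Spec_part1 part1 part1_alt
  apply PySem.List.foldl_congr_mem
  intro acc p hp
  have hline : p.2 ∈ lines := by
    rw [PySem.List.mem_enumerate_iff] at hp
    obtain ⟨k, hk, rfl⟩ := hp
    exact List.getElem_mem hk
  have hok := hpre p.2 hline
  simp only [PySem.List.slice?_none_none_neg_one, Option.getD_some]
  by_cases hb : part1AltValid (part1Toks p.2) true = true
  · rw [if_pos ((part1_line_eq _ hok _ rfl).mpr hb), if_pos hb]
  · rw [if_neg (fun hc => hb ((part1_line_eq _ hok _ rfl).mp hc)), if_neg hb]
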